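-- pv_equiv track=rewrite | github.com/JJeo-Ri/suwan-one-commit-a-day | codility/binary_gap.py | solution
-- ===== SOURCE A (Python) =====
-- def solution(N):
--     zero_cnt = 0
--     result = []
--     for k in bin(N)[2:]:
--         if k == '1':
--             result.append(zero_cnt)
--             zero_cnt = 0
--         else:
--             zero_cnt += 1
--     return max(result)
-- ===== SOURCE B (Python) =====
-- def solution(N):
--     bits = bin(N)[2:]
--     parts = bits.split('1')
--     return max(len(seg) for seg in parts[:-1])
-- ===== Notes on version B (the rewrite author's own statement) =====
-- stated objective: simpler
-- what changed: B splits the binary string on '1' and takes the max length of all segments but the last, replacing A's single scan with a running zero counter and accumulator list.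
-- outside the precondition, e.g. on solution(0): A raises ValueError, B raises ValueError
import Mathlib
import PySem

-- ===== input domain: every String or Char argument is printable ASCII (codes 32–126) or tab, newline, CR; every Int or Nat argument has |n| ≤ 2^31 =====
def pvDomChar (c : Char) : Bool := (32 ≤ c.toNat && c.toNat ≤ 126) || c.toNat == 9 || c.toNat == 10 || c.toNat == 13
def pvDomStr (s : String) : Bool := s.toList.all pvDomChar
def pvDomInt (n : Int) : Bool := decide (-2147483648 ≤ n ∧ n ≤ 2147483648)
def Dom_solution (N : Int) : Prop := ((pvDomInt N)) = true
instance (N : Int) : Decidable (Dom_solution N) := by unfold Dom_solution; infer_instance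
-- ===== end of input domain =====

-- B replaces A's running-counter scan by splitting the binary string on '1'
-- and taking the max segment length excluding the last segment (objective: simpler).

-- Shared helper for Python's bin(N)[2:] (both Pythons call bin):
-- binary digits of a positive natural, most significant first (exact).
def pvBinCore (n : Nat) : List Char :=
  if _h : n = 0 then []
  else pvBinCore (n / 2) ++ [if n % 2 = 1 then '1' else '0']
termination_by n
decreasing_by exact Nat.div_lt_self (Nat.pos_of_ne_zero _h) (by norm_num)

-- bin(n)[2:] for n ≥ 0  (bin(0)[2:] = "0")
def pvBinChars (n : Nat) : List Char := if n = 0 then ['0'] else pvBinCore n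

-- bin(N)[2:]: for negative N Python gives '-0b…', so [2:] starts with the char 'b' (exact).
def pvBits (N : Int) : List Char :=
  if N ≥ 0 then pvBinChars N.toNat else 'b' :: pvBinChars (-N).toNat

-- ===== PORT A =====
-- A's loop: zero_cnt / result accumulator over the characters of bin(N)[2:].
def pvLoopA : List Char → Int → List Int → List Int
  | [], _, res => res
  | c :: rest, z, res =>
      if c = '1' then pvLoopA rest 0 (res ++ [z]) else pvLoopA rest (z + 1) res

-- max(result): Python raises ValueError when result is empty (only N = 0), excluded by Pre_.
def solution (N : Int) : Int :=
  (PySem.List.max? (pvLoopA (pvBits N) 0 []) (fun x => x)).getD 0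

-- ===== PORT B =====
-- bits.split('1'): Python str.split with a one-char separator, ported by hand, step for step (exact).
def pvSplit1 (sep : Char) : List Char → List (List Char)
  | [] => [[]]
  | c :: rest =>
      match pvSplit1 sep rest with
      | s :: ss => if c = sep then [] :: s :: ss else (c :: s) :: ss
      | [] => [[]]

-- max(len(seg) for seg in parts[:-1]); raises ValueError on empty (only N = 0), excluded by Pre_.
def solution_alt (N : Int) : Int :=
  let parts := pvSplit1 '1' (pvBits N)
  (PySem.List.max? (parts.dropLast.map (fun seg => (seg.length : Int))) (fun x => x)).getD 0

-- ===== PRECONDITION & SPEC =====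
-- N = 0 is excluded: there bin(N)[2:] contains no '1', result is empty and A's max([]) raises ValueError.
def Pre_solution (N : Int) : Prop := N ≠ 0
instance (N : Int) : Decidable (Pre_solution N) := by unfold Pre_solution; infer_instance
def pvWitness_solution : Int := (9)
def Spec_solution (N : Int) (out : Int) : Prop := out = solution_alt N
instance (N : Int) (out : Int) : Decidable (Spec_solution N out) := by unfold Spec_solution; infer_instance

-- ===== CLAIM =====
def Claim_equal_solution : Prop := ∀ (N : Int), Dom_solution N → Pre_solution N → Spec_solution N (solution N)

-- ===== LEMMAS AND PROOFS =====
-- add z to the head of a list (the pending zero count absorbed into the first segment)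
def pvBump (z : Int) : List Int → List Int
  | [] => []
  | a :: t => (z + a) :: t

theorem pvSplit1_ne_nil (sep : Char) (l : List Char) : pvSplit1 sep l ≠ [] := by
  cases l with
  | nil => simp [pvSplit1]
  | cons c rest =>
      unfold pvSplit1
      split
      · split <;> simp
      · simp

theorem pvBump_zero (t : List Int) : pvBump 0 t = t := by
  cases t <;> simp [pvBump]

theorem pvLoopA_eq_split (l : List Char) : ∀ (z : Int) (res : List Int),
    pvLoopA l z res
      = res ++ pvBump z (((pvSplit1 '1' l).dropLast).map (fun seg => (seg.length : Int))) := by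
  induction l with
  | nil => intro z res; simp [pvLoopA, pvSplit1, pvBump]
  | cons c rest ih =>
      intro z res
      cases h : pvSplit1 '1' rest with
      | nil => exact absurd h (pvSplit1_ne_nil '1' rest)
      | cons s ss =>
          by_cases hc : c = '1'
          · subst hc
            simp only [pvLoopA]
            rw [ih]
            cases ss with
            | nil => simp [pvSplit1, h, pvBump]
            | cons s2 ss2 => simp [pvSplit1, h, pvBump]
          · simp only [pvLoopA, if_neg hc]
            rw [ih]
            simp only [pvSplit1, h, if_neg hc]
            cases ss with
            | nil => simp [pvBump]
            | cons s2 ss2 =>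
                simp [pvBump, List.dropLast]
                ring

-- ===== VERDICT =====
theorem solution_spec : Claim_equal_solution := by
  intro N _ _
  unfold Spec_solution solution solution_alt
  rw [pvLoopA_eq_split, List.nil_append, pvBump_zero]
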